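-- pv_equiv track=rewrite | github.com/david00medina/workato-scripts | download-workato-manifest.py | find_projects_by_id
-- ===== SOURCE A (Python) =====
-- from typing import Any, Dict, Iterable, List, Optional
--
-- def find_projects_by_id(
--     project_ids: Iterable[str], projects: List[Dict[str, Any]]
-- ) -> List[Dict[str, Any]]:
--     lookup = {str(p.get("id") or p.get("project_id")): p for p in projects}
--     selected: List[Dict[str, Any]] = []
--     for pid in project_ids:
--         key = str(pid)
--         project = lookup.get(key)
--         if project:
--             selected.append(project)
--         else:
--             selected.append({"id": key, "name": f"project-{key}"})
--     return selected
-- ===== SOURCE B (Python) =====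
-- def find_projects_by_id(project_ids, projects):
--     def key_of(p):
--         return str(p.get("id") or p.get("project_id"))
--
--     def pick(key):
--         match = None
--         for p in projects:
--             if key_of(p) == key:
--                 match = p
--         return match if match else {"id": key, "name": f"project-{key}"}
--
--     return [pick(str(pid)) for pid in project_ids]
-- ===== Notes on version B (the rewrite author's own statement) =====
-- stated objective: alternative
-- what changed: B drops A's pre-built lookup dict: for each requested id it scans the projects list directly, keeping the last project whose derived key matches (reproducing dict-overwrite semantics), and builds the result as a comprehension instead of an append loop.
import Mathlib
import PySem

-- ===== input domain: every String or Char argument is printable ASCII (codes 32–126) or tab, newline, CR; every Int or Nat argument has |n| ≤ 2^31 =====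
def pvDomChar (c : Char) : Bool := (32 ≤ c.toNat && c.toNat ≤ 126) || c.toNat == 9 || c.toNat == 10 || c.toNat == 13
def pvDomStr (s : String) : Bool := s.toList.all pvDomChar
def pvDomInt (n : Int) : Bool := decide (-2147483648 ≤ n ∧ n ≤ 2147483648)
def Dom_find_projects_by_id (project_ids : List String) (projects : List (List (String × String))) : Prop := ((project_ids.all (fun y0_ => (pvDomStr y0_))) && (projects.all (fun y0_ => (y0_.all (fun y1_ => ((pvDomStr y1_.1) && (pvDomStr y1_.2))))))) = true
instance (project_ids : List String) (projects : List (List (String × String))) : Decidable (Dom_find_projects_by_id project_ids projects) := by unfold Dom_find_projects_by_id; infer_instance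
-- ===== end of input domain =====

-- B: same result without A's pre-built lookup dict — per-id last-match scan of the projects list (alternative decomposition, not faster).
-- ===== PORT A =====
-- str(p.get("id") or p.get("project_id")): the key A's dict comprehension derives for project p
def pvKeyOf (p : List (String × String)) : String :=
  let a := (PySem.Dict.mk p).get? "id"
  let b := if a = some "" ∨ a = none then (PySem.Dict.mk p).get? "project_id" else a
  match b with
  | some s => s
  | none => "None"

def find_projects_by_id (project_ids : List String) (projects : List (List (String × String))) : List (List (String × String)) :=
  let lookup : PySem.Dict String (List (String × String)) :=
    projects.foldl (fun d p => d.insert (pvKeyOf p) p) PySem.Dict.empty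
  project_ids.foldl (fun selected pid =>
    selected ++ [match lookup.get? pid with
      | some project => if project.isEmpty then [("id", pid), ("name", "project-" ++ pid)] else project
      | none => [("id", pid), ("name", "project-" ++ pid)]]) []

-- ===== PORT B =====
-- pick(key): last project whose derived key matches, else the fallback dict
def pvPick (projects : List (List (String × String))) (key : String) : List (String × String) :=
  let m := projects.foldl (fun m p => if pvKeyOf p = key then some p else m)
    (none : Option (List (String × String)))
  match m with
  | some p => if p.isEmpty then [("id", key), ("name", "project-" ++ key)] else p
  | none => [("id", key), ("name", "project-" ++ key)]

def find_projects_by_id_alt (project_ids : List String) (projects : List (List (String × String))) : List (List (String × String)) :=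
  project_ids.map (fun pid => pvPick projects pid)

-- ===== PRECONDITION & SPEC =====
def Spec_find_projects_by_id (project_ids : List String) (projects : List (List (String × String))) (out : List (List (String × String))) : Prop := out = find_projects_by_id_alt project_ids projects
instance (project_ids : List String) (projects : List (List (String × String))) (out : List (List (String × String))) : Decidable (Spec_find_projects_by_id project_ids projects out) := by unfold Spec_find_projects_by_id; infer_instance

-- ===== CLAIM (what is proved, stated in full; the proofs are below) =====
def Claim_equal_find_projects_by_id : Prop := ∀ (project_ids : List String) (projects : List (List (String × String))), Dom_find_projects_by_id project_ids projects → Spec_find_projects_by_id project_ids projects (find_projects_by_id project_ids projects)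

-- ===== LEMMAS AND PROOFS =====
-- get? of A's insert-loop dict is exactly B's last-match fold
lemma pvGet_foldl_insert (ps : List (List (String × String)))
    (d : PySem.Dict String (List (String × String))) (k : String) :
    (ps.foldl (fun d p => d.insert (pvKeyOf p) p) d).get? k =
      ps.foldl (fun m p => if pvKeyOf p = k then some p else m) (d.get? k) := by
  induction ps generalizing d with
  | nil => rfl
  | cons p ps ih =>
      simp only [List.foldl_cons, ih, PySem.Dict.get?_insert]
      congr 1
      by_cases h : pvKeyOf p = k
      · simp [h]
      · simp [eq_comm, h]

-- ===== VERDICT (by name: the statement is the Claim_ definition above) =====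
theorem find_projects_by_id_spec : Claim_equal_find_projects_by_id := by
  intro project_ids projects _
  unfold Spec_find_projects_by_id find_projects_by_id find_projects_by_id_alt
  rw [PySem.List.foldl_append_singleton_eq_map]
  refine List.map_congr_left (fun pid _ => ?_)
  simp only [pvGet_foldl_insert, PySem.Dict.get?_empty, pvPick]
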